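-- pv_equiv track=rewrite | github.com/durgesh-rathod-sf/masking-handwritten-text | main.py | find_intersections_and_cropout_printed_text_rects
-- ===== SOURCE A (Python) =====
-- def is_overlap(rect1, rect2):
--     """
--     Check if two rectangles overlap.
--     """
--     return not (
--         rect1[2] <= rect2[0]
--         or rect1[0] >= rect2[2]
--         or rect1[1] >= rect2[3]
--         or rect1[3] <= rect2[1]
--     )
--
-- def find_intersections_and_cropout_printed_text_rects(
--     handwritten_text_rects, printed_text_rects
-- ):
--     to_be_masked_rects = []
--     for to_paint_rect in handwritten_text_rects:
--         entirely_overlapped = False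
--         for not_to_paint_rect in printed_text_rects:
--             if (
--                 to_paint_rect[0] >= not_to_paint_rect[0]
--                 and to_paint_rect[1] >= not_to_paint_rect[1]
--                 and to_paint_rect[2] <= not_to_paint_rect[2]
--                 and to_paint_rect[3] <= not_to_paint_rect[3]
--             ):
--                 entirely_overlapped = True
--                 break
--         if entirely_overlapped:
--             continue
--
--         remaining_area = [to_paint_rect]
--         for not_to_paint_rect in printed_text_rects:
--             new_remaining_area = []
--             for area in remaining_area:
--                 if is_overlap(area, not_to_paint_rect):
--                     # If there's an overlap, split the area and keep the non-overlapping parts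
--                     left = max(area[0], not_to_paint_rect[0])
--                     top = max(area[1], not_to_paint_rect[1])
--                     right = min(area[2], not_to_paint_rect[2])
--                     bottom = min(area[3], not_to_paint_rect[3])
--                     if left < right and top < bottom:
--                         # Non-overlapping area on the left
--                         if area[0] < left:
--                             new_remaining_area.append((area[0], area[1], left, area[3]))
--                         # Non-overlapping area on the right
--                         if right < area[2]:
--                             new_remaining_area.append(
--                                 (right, area[1], area[2], area[3])
--                             )
--                         # Non-overlapping area on the top
--                         if area[1] < top:
--                             new_remaining_area.append((left, area[1], right, top))
--                         # Non-overlapping area on the bottom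
--                         if bottom < area[3]:
--                             new_remaining_area.append((left, bottom, right, area[3]))
--                     else:
--                         # If the cropped area is degenerate, skip it
--                         new_remaining_area.append(area)
--                 else:
--                     # If there's no overlap, keep the original area
--                     new_remaining_area.append(area)
--             remaining_area = new_remaining_area
--         # After handling all intersections, add the remaining areas to the painted area
--         to_be_masked_rects.extend(remaining_area)
--     return to_be_masked_rects
-- ===== SOURCE B (Python) =====
-- def find_intersections_and_cropout_printed_text_rects(
--     handwritten_text_rects, printed_text_rects
-- ):
--     # Depth-first: carry each fragment individually through the remaining
--     # printed rects by recursion on the printed-rect list, instead of A's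
--     # pre-scan plus staged breadth-first passes over a remaining_area list.
--     def remaining(area, printed):
--         if not printed:
--             return [area]
--         p, rest = printed[0], printed[1:]
--         x0, y0, x1, y1 = area
--         if p[0] <= x0 and p[1] <= y0 and x1 <= p[2] and y1 <= p[3]:
--             return []  # area fully covered by p
--         left, top = max(x0, p[0]), max(y0, p[1])
--         right, bottom = min(x1, p[2]), min(y1, p[3])
--         if left < right and top < bottom:
--             out = []
--             if x0 < left:
--                 out += remaining((x0, y0, left, y1), rest)
--             if right < x1:
--                 out += remaining((right, y0, x1, y1), rest)
--             if y0 < top: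
--                 out += remaining((left, y0, right, top), rest)
--             if bottom < y1:
--                 out += remaining((left, bottom, right, y1), rest)
--             return out
--         return remaining(area, rest)  # no proper overlap: area survives p
--
--     result = []
--     for rect in handwritten_text_rects:
--         result.extend(remaining(rect, printed_text_rects))
--     return result
-- ===== Notes on version B (the rewrite author's own statement) =====
-- stated objective: alternative
-- what changed: Replaces A's per-rect containment pre-scan plus staged breadth-first passes (rebuilding a remaining_area list per printed rect) by a single depth-first recursion on the printed-rect list that carries each fragment individually through the remaining rects; the pre-scan and is_overlap disappear, and equality of output order follows from associativity of list bind.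
import Mathlib
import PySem

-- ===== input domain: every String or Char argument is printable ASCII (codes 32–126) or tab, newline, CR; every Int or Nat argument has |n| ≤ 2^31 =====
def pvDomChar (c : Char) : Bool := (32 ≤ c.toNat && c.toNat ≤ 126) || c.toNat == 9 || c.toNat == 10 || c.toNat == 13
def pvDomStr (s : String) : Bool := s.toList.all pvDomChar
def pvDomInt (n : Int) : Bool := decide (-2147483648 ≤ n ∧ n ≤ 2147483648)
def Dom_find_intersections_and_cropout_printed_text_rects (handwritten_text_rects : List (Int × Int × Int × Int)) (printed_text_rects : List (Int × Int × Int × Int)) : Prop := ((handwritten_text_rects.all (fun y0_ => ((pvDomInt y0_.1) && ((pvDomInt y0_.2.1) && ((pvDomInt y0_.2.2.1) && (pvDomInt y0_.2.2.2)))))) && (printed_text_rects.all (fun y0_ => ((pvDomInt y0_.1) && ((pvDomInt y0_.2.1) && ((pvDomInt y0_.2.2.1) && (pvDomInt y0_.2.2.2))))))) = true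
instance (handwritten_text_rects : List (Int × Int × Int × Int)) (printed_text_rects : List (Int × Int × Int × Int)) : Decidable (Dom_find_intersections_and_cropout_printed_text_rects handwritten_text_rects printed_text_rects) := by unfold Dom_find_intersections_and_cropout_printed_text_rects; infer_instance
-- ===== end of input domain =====

-- B replaces A's containment pre-scan plus staged breadth-first passes by one
-- depth-first recursion on the printed-rect list per fragment; objective: alternative.

-- ===== PORT A =====

-- is_overlap from Source A
def pv_is_overlap (rect1 rect2 : Int × Int × Int × Int) : Bool :=
  !(rect1.2.2.1 ≤ rect2.1 || rect1.1 ≥ rect2.2.2.1 || rect1.2.1 ≥ rect2.2.2.2 || rect1.2.2.2 ≤ rect2.2.1)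

-- A's inner 'for not_to_paint_rect … break' flag loop
def pvEntirelyOverlapped (to_paint_rect : Int × Int × Int × Int) : List (Int × Int × Int × Int) → Bool
  | [] => false
  | p :: rest =>
    if to_paint_rect.1 ≥ p.1 && to_paint_rect.2.1 ≥ p.2.1 &&
       to_paint_rect.2.2.1 ≤ p.2.2.1 && to_paint_rect.2.2.2 ≤ p.2.2.2
    then true
    else pvEntirelyOverlapped to_paint_rect rest

-- body of A's 'for area in remaining_area' loop: the pieces appended for one area
def pvAStep (area p : Int × Int × Int × Int) : List (Int × Int × Int × Int) :=
  if pv_is_overlap area p then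
    let left := max area.1 p.1
    let top := max area.2.1 p.2.1
    let right := min area.2.2.1 p.2.2.1
    let bottom := min area.2.2.2 p.2.2.2
    if left < right ∧ top < bottom then
      (if area.1 < left then [(area.1, area.2.1, left, area.2.2.2)] else []) ++
      (if right < area.2.2.1 then [(right, area.2.1, area.2.2.1, area.2.2.2)] else []) ++
      (if area.2.1 < top then [(left, area.2.1, right, top)] else []) ++
      (if bottom < area.2.2.2 then [(left, bottom, right, area.2.2.2)] else [])
    else [area]
  else [area]

def find_intersections_and_cropout_printed_text_rects (handwritten_text_rects : List (Int × Int × Int × Int)) (printed_text_rects : List (Int × Int × Int × Int)) : List (Int × Int × Int × Int) :=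
  handwritten_text_rects.foldl (fun to_be_masked_rects to_paint_rect =>
    if pvEntirelyOverlapped to_paint_rect printed_text_rects then
      to_be_masked_rects
    else
      to_be_masked_rects ++
        printed_text_rects.foldl
          (fun remaining_area not_to_paint_rect =>
            remaining_area.foldl
              (fun new_remaining_area area => new_remaining_area ++ pvAStep area not_to_paint_rect) [])
          [to_paint_rect]) []

-- ===== PORT B =====

-- 'remaining' from Source B: depth-first recursion on the printed-rect list
def pvRem : (Int × Int × Int × Int) → List (Int × Int × Int × Int) → List (Int × Int × Int × Int)
  | area, [] => [area]
  | area, p :: rest =>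
    if p.1 ≤ area.1 ∧ p.2.1 ≤ area.2.1 ∧ area.2.2.1 ≤ p.2.2.1 ∧ area.2.2.2 ≤ p.2.2.2 then
      []
    else
      let left := max area.1 p.1
      let top := max area.2.1 p.2.1
      let right := min area.2.2.1 p.2.2.1
      let bottom := min area.2.2.2 p.2.2.2
      if left < right ∧ top < bottom then
        (if area.1 < left then pvRem (area.1, area.2.1, left, area.2.2.2) rest else []) ++
        (if right < area.2.2.1 then pvRem (right, area.2.1, area.2.2.1, area.2.2.2) rest else []) ++
        (if area.2.1 < top then pvRem (left, area.2.1, right, top) rest else []) ++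
        (if bottom < area.2.2.2 then pvRem (left, bottom, right, area.2.2.2) rest else [])
      else pvRem area rest

def find_intersections_and_cropout_printed_text_rects_alt (handwritten_text_rects : List (Int × Int × Int × Int)) (printed_text_rects : List (Int × Int × Int × Int)) : List (Int × Int × Int × Int) :=
  handwritten_text_rects.flatMap (fun rect => pvRem rect printed_text_rects)

-- ===== PRECONDITION & SPEC =====
def Spec_find_intersections_and_cropout_printed_text_rects (handwritten_text_rects : List (Int × Int × Int × Int)) (printed_text_rects : List (Int × Int × Int × Int)) (out : List (Int × Int × Int × Int)) : Prop := out = find_intersections_and_cropout_printed_text_rects_alt handwritten_text_rects printed_text_rects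
instance (handwritten_text_rects : List (Int × Int × Int × Int)) (printed_text_rects : List (Int × Int × Int × Int)) (out : List (Int × Int × Int × Int)) : Decidable (Spec_find_intersections_and_cropout_printed_text_rects handwritten_text_rects printed_text_rects out) := by unfold Spec_find_intersections_and_cropout_printed_text_rects; infer_instance

-- ===== CLAIM (what is proved, stated in full; the proofs are below) =====
def Claim_equal_find_intersections_and_cropout_printed_text_rects : Prop := ∀ (handwritten_text_rects : List (Int × Int × Int × Int)) (printed_text_rects : List (Int × Int × Int × Int)), Dom_find_intersections_and_cropout_printed_text_rects handwritten_text_rects printed_text_rects → Spec_find_intersections_and_cropout_printed_text_rects handwritten_text_rects printed_text_rects (find_intersections_and_cropout_printed_text_rects handwritten_text_rects printed_text_rects)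

-- ===== LEMMAS AND PROOFS =====

-- proof-side pointwise subtraction (B's one-step behaviour, factored out for the proof)
def pvSubtract (area rect : Int × Int × Int × Int) : List (Int × Int × Int × Int) :=
  if rect.1 ≤ area.1 ∧ rect.2.1 ≤ area.2.1 ∧ area.2.2.1 ≤ rect.2.2.1 ∧ area.2.2.2 ≤ rect.2.2.2 then
    []
  else
    let left := max area.1 rect.1
    let top := max area.2.1 rect.2.1
    let right := min area.2.2.1 rect.2.2.1
    let bottom := min area.2.2.2 rect.2.2.2
    if left < right ∧ top < bottom then
      (if area.1 < left then [(area.1, area.2.1, left, area.2.2.2)] else []) ++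
      (if right < area.2.2.1 then [(right, area.2.1, area.2.2.1, area.2.2.2)] else []) ++
      (if area.2.1 < top then [(left, area.2.1, right, top)] else []) ++
      (if bottom < area.2.2.2 then [(left, bottom, right, area.2.2.2)] else [])
    else [area]

-- a is (weakly) contained in p
def pvIn (a p : Int × Int × Int × Int) : Prop :=
  p.1 ≤ a.1 ∧ p.2.1 ≤ a.2.1 ∧ a.2.2.1 ≤ p.2.2.1 ∧ a.2.2.2 ≤ p.2.2.2

def pvNondeg (a : Int × Int × Int × Int) : Prop := a.1 < a.2.2.1 ∧ a.2.1 < a.2.2.2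

theorem pv_foldl_append {α β : Type} (f : α → List β) :
    ∀ (l : List α) (init : List β),
      l.foldl (fun acc a => acc ++ f a) init = init ++ l.flatMap f := by
  intro l
  induction l with
  | nil => intro init; simp
  | cons a rest ih => intro init; simp [List.foldl, ih]

theorem pv_flatMap_congr {α β : Type} {f g : α → List β} :
    ∀ {l : List α}, (∀ a ∈ l, f a = g a) → l.flatMap f = l.flatMap g := by
  intro l
  induction l with
  | nil => intro _; simp
  | cons a rest ih =>
    intro h
    simp only [List.flatMap_cons]
    rw [h a (by simp), ih (fun b hb => h b (by simp [hb]))]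

theorem pvEntirelyOverlapped_iff (r : Int × Int × Int × Int) (ps : List (Int × Int × Int × Int)) :
    pvEntirelyOverlapped r ps = true ↔ ∃ p ∈ ps, pvIn r p := by
  induction ps with
  | nil => simp [pvEntirelyOverlapped]
  | cons p rest ih =>
    simp only [pvEntirelyOverlapped, List.mem_cons]
    split_ifs with h
    · simp only [Bool.and_eq_true, decide_eq_true_eq, ge_iff_le] at h
      simp only [true_iff]
      exact ⟨p, Or.inl rfl, h.1.1.1, h.1.1.2, h.1.2, h.2⟩
    · simp only [Bool.and_eq_true, decide_eq_true_eq, ge_iff_le, not_and] at h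
      rw [ih]
      constructor
      · rintro ⟨q, hq, hin⟩; exact ⟨q, Or.inr hq, hin⟩
      · rintro ⟨q, rfl | hq', hin⟩
        · obtain ⟨h1, h2, h3, h4⟩ := hin; exact absurd h4 (h ⟨⟨h1, h2⟩, h3⟩)
        · exact ⟨q, hq', hin⟩

-- step agreement: whenever the area is nondegenerate or not contained in p
theorem pvAStep_eq_pvSubtract (a p : Int × Int × Int × Int)
    (h : pvNondeg a ∨ ¬ pvIn a p) : pvAStep a p = pvSubtract a p := by
  obtain ⟨a0, a1, a2, a3⟩ := a
  obtain ⟨p0, p1, p2, p3⟩ := p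
  simp only [pvNondeg, pvIn] at h
  simp only [pvAStep, pvSubtract, pv_is_overlap, Bool.not_eq_true', Bool.or_eq_false_iff,
    decide_eq_false_iff_not, not_le, ge_iff_le]
  split_ifs <;> first | rfl | omega

-- containment facts about pvSubtract's output
theorem pvSubtract_mem_in {a p b : Int × Int × Int × Int}
    (hb : b ∈ pvSubtract a p) : pvIn b a := by
  obtain ⟨a0, a1, a2, a3⟩ := a
  obtain ⟨p0, p1, p2, p3⟩ := p
  simp only [pvSubtract] at hb
  simp only [pvIn]
  split_ifs at hb <;> simp_all <;>
    first | omega | (rcases hb with hb | hb | hb | hb <;> simp_all <;> omega)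

theorem pvSubtract_mem_nondeg {a p b : Int × Int × Int × Int}
    (ha : pvNondeg a) (hb : b ∈ pvSubtract a p) : pvNondeg b := by
  obtain ⟨a0, a1, a2, a3⟩ := a
  obtain ⟨p0, p1, p2, p3⟩ := p
  simp only [pvSubtract] at hb
  simp only [pvNondeg] at ha ⊢
  split_ifs at hb <;> simp_all <;>
    rcases hb with hb | hb | hb | hb <;> simp_all

theorem pvSubtract_deg {a p : Int × Int × Int × Int}
    (ha : ¬ pvNondeg a) (hp : ¬ pvIn a p) : pvSubtract a p = [a] := by
  obtain ⟨a0, a1, a2, a3⟩ := a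
  obtain ⟨p0, p1, p2, p3⟩ := p
  simp only [pvNondeg, not_and_or, not_lt] at ha
  simp only [pvIn] at hp
  simp only [pvSubtract]
  split_ifs <;> first | rfl | omega

theorem pvSubtract_inside {a p : Int × Int × Int × Int}
    (h : pvIn a p) : pvSubtract a p = [] := by
  obtain ⟨a0, a1, a2, a3⟩ := a
  obtain ⟨p0, p1, p2, p3⟩ := p
  simp only [pvIn] at h
  simp only [pvSubtract]
  rw [if_pos]
  exact ⟨h.1, h.2.1, h.2.2.1, h.2.2.2⟩

-- one unfolding of pvRem as 'subtract then bind'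
theorem pvRem_cons (a p : Int × Int × Int × Int) (rest : List (Int × Int × Int × Int)) :
    pvRem a (p :: rest) = (pvSubtract a p).flatMap (fun b => pvRem b rest) := by
  obtain ⟨a0, a1, a2, a3⟩ := a
  obtain ⟨p0, p1, p2, p3⟩ := p
  simp only [pvRem, pvSubtract]
  split_ifs <;> simp

-- the breadth-first chain of pvSubtract (what A's inner loops compute, after rewriting)
def pvChainB (ps : List (Int × Int × Int × Int)) (areas : List (Int × Int × Int × Int)) :
    List (Int × Int × Int × Int) :=
  ps.foldl (fun ar p => ar.flatMap (fun a => pvSubtract a p)) areas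

theorem pvChainB_nil (ps : List (Int × Int × Int × Int)) : pvChainB ps [] = [] := by
  induction ps with
  | nil => rfl
  | cons p rest ih => simpa [pvChainB, List.foldl] using ih

theorem pvChainB_append (ps : List (Int × Int × Int × Int)) :
    ∀ (l1 l2 : List (Int × Int × Int × Int)),
      pvChainB ps (l1 ++ l2) = pvChainB ps l1 ++ pvChainB ps l2 := by
  induction ps with
  | nil => intro l1 l2; rfl
  | cons p rest ih =>
    intro l1 l2
    simp only [pvChainB, List.foldl] at *
    rw [List.flatMap_append, ih]

theorem pvChainB_flatMap (ps : List (Int × Int × Int × Int)) :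
    ∀ (areas : List (Int × Int × Int × Int)),
      pvChainB ps areas = areas.flatMap (fun a => pvChainB ps [a]) := by
  intro areas
  induction areas with
  | nil => simp [pvChainB_nil]
  | cons a rest ih =>
    have : a :: rest = [a] ++ rest := rfl
    rw [this, pvChainB_append, ih, List.flatMap_append]
    simp

-- depth-first = breadth-first: associativity of list bind
theorem pvRem_eq_chain : ∀ (ps : List (Int × Int × Int × Int)) (a : Int × Int × Int × Int),
    pvRem a ps = pvChainB ps [a] := by
  intro ps
  induction ps with
  | nil => intro a; rfl
  | cons p rest ih =>
    intro a
    rw [pvRem_cons]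
    have h1 : (pvSubtract a p).flatMap (fun b => pvRem b rest) =
        (pvSubtract a p).flatMap (fun b => pvChainB rest [b]) :=
      pv_flatMap_congr (fun b _ => ih b)
    rw [h1, ← pvChainB_flatMap]
    simp [pvChainB, List.foldl]

-- a containing printed rect empties the whole pipeline
theorem pvChainB_kill (rect : Int × Int × Int × Int) :
    ∀ (ps areas : List (Int × Int × Int × Int)),
      (∃ p ∈ ps, pvIn rect p) → (∀ a ∈ areas, pvIn a rect) → pvChainB ps areas = [] := by
  intro ps
  induction ps with
  | nil => rintro areas ⟨p, hp, _⟩ _; simp at hp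
  | cons p rest ih =>
    rintro areas ⟨q, hq, hqin⟩ hinv
    simp only [pvChainB, List.foldl] at *
    rcases List.mem_cons.mp hq with rfl | hq'
    · have h0 : areas.flatMap (fun a => pvSubtract a q) = [] := by
        apply List.flatMap_eq_nil_iff.mpr
        intro a ha
        exact pvSubtract_inside ⟨le_trans hqin.1 (hinv a ha).1, le_trans hqin.2.1 (hinv a ha).2.1,
          le_trans (hinv a ha).2.2.1 hqin.2.2.1, le_trans (hinv a ha).2.2.2 hqin.2.2.2⟩
      rw [h0]
      exact pvChainB_nil rest
    · apply ih _ ⟨q, hq', hqin⟩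
      intro b hb
      obtain ⟨a, ha, hba⟩ := List.mem_flatMap.mp hb
      have h1 := pvSubtract_mem_in hba
      have h2 := hinv a ha
      exact ⟨le_trans h2.1 h1.1, le_trans h2.2.1 h1.2.1, le_trans h1.2.2.1 h2.2.2.1,
        le_trans h1.2.2.2 h2.2.2.2⟩

-- when rect is contained in no printed rect, A's splitting chain equals the pvSubtract chain
theorem pvChain_eq (rect : Int × Int × Int × Int) :
    ∀ (ps areas : List (Int × Int × Int × Int)),
      (∀ p ∈ ps, ¬ pvIn rect p) → (∀ a ∈ areas, pvNondeg a ∨ a = rect) →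
      ps.foldl (fun ar p => ar.flatMap (fun a => pvAStep a p)) areas = pvChainB ps areas := by
  intro ps
  induction ps with
  | nil => intro areas _ _; rfl
  | cons p rest ih =>
    intro areas hps hinv
    simp only [pvChainB, List.foldl] at *
    have hstep : areas.flatMap (fun a => pvAStep a p) = areas.flatMap (fun a => pvSubtract a p) := by
      apply pv_flatMap_congr
      intro a ha
      rcases hinv a ha with hnd | rfl
      · exact pvAStep_eq_pvSubtract a p (Or.inl hnd)
      · exact pvAStep_eq_pvSubtract a p (Or.inr (hps p (by simp)))
    rw [hstep]
    apply ih _ (fun q hq => hps q (by simp [hq]))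
    intro b hb
    obtain ⟨a, ha, hba⟩ := List.mem_flatMap.mp hb
    rcases hinv a ha with hnd | rfl
    · exact Or.inl (pvSubtract_mem_nondeg hnd hba)
    · by_cases hnd : pvNondeg a
      · exact Or.inl (pvSubtract_mem_nondeg hnd hba)
      · rw [pvSubtract_deg hnd (hps p (by simp))] at hba
        simp at hba
        exact Or.inr hba

-- per-handwritten-rect contributions agree
theorem pvContrib_eq (pr : List (Int × Int × Int × Int)) (rect : Int × Int × Int × Int) :
    (if pvEntirelyOverlapped rect pr then ([] : List (Int × Int × Int × Int))
     else pr.foldl (fun ar p => ar.flatMap (fun a => pvAStep a p)) [rect]) =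
    pvChainB pr [rect] := by
  by_cases h : pvEntirelyOverlapped rect pr = true
  · rw [if_pos h]
    exact (pvChainB_kill rect pr [rect] ((pvEntirelyOverlapped_iff rect pr).mp h)
      (by intro a ha; simp at ha; subst ha; exact ⟨le_refl _, le_refl _, le_refl _, le_refl _⟩)).symm
  · rw [if_neg h]
    apply pvChain_eq rect pr [rect]
    · intro p hp hin
      exact h ((pvEntirelyOverlapped_iff rect pr).mpr ⟨p, hp, hin⟩)
    · intro a ha; simp at ha; exact Or.inr ha

-- rewrite A's inner area loop to a flatMap
theorem pvA_inner (pr : List (Int × Int × Int × Int)) (areas : List (Int × Int × Int × Int)) :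
    pr.foldl (fun remaining_area p =>
        remaining_area.foldl (fun nra area => nra ++ pvAStep area p) []) areas =
    pr.foldl (fun ar p => ar.flatMap (fun a => pvAStep a p)) areas := by
  induction pr generalizing areas with
  | nil => rfl
  | cons p rest ih =>
    simp only [List.foldl]
    rw [pv_foldl_append (fun a => pvAStep a p) areas []]
    simp only [List.nil_append]
    exact ih _

-- ===== VERDICT (by name: the statement is the Claim_ definition above) =====
theorem find_intersections_and_cropout_printed_text_rects_spec : Claim_equal_find_intersections_and_cropout_printed_text_rects := by
  intro hw pr hd
  clear hd
  unfold Spec_find_intersections_and_cropout_printed_text_rects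
  unfold find_intersections_and_cropout_printed_text_rects
  unfold find_intersections_and_cropout_printed_text_rects_alt
  have hstep : ∀ (acc : List (Int × Int × Int × Int)) (rect : Int × Int × Int × Int),
      (if pvEntirelyOverlapped rect pr then acc
       else acc ++ pr.foldl (fun remaining_area p =>
          remaining_area.foldl (fun nra area => nra ++ pvAStep area p) []) [rect]) =
      acc ++ pvChainB pr [rect] := by
    intro acc rect
    rw [pvA_inner]
    by_cases h : pvEntirelyOverlapped rect pr = true
    · rw [if_pos h, ← pvContrib_eq pr rect, if_pos h, List.append_nil]
    · rw [if_neg h, ← pvContrib_eq pr rect, if_neg h]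
  calc hw.foldl (fun acc rect =>
        if pvEntirelyOverlapped rect pr then acc
        else acc ++ pr.foldl (fun remaining_area p =>
            remaining_area.foldl (fun nra area => nra ++ pvAStep area p) []) [rect]) []
      = hw.foldl (fun acc rect => acc ++ pvChainB pr [rect]) [] := by
        induction hw using List.reverseRecOn with
        | nil => rfl
        | append_singleton l r ihl => rw [List.foldl_append, List.foldl_append, ihl, List.foldl_cons, List.foldl_cons, List.foldl_nil, List.foldl_nil, hstep]
    _ = hw.flatMap (fun rect => pvChainB pr [rect]) := by
        rw [pv_foldl_append (fun rect => pvChainB pr [rect]) hw []]; simp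
    _ = hw.flatMap (fun rect => pvRem rect pr) :=
        pv_flatMap_congr (fun rect _ => (pvRem_eq_chain pr rect).symm)
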